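-- pv_equiv track=rewrite | github.com/justinpo/142 | MPA2-1/po2-1.py | getLineCount
-- ===== SOURCE A (Python) =====
-- def getLineCount(string: str) -> int:
--     count: int = 0
--     i: int = 0
--     string += " "
--
--     while i < len(string):
--         if (
--             string[i] == ">"
--             or string[i] == "<"
--             or string[i] == "="
--             or string[i] == "*"
--             or string[i] == "/"
--             or string[i] == "+"
--             or string[i] == "-"
--         ):
--             if (
--                 string[i + 1] == ">"
--                 or string[i + 1] == "<"
--                 or string[i + 1] == "="
--                 or string[i + 1] == "*"
--                 or string[i + 1] == "/"
--                 or string[i + 1] == "+"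
--                 or string[i + 1] == "-"
--             ):
--                 i += 1
--
--             count += 1
--
--         i += 1
--
--     return count
-- ===== SOURCE B (Python) =====
-- def getLineCount(string: str) -> int:
--     # Single pass over maximal runs of operator characters: a run of length L
--     # contributes ceil(L/2) = (L+1)//2 operator tokens.
--     total = 0
--     run = 0
--     for ch in string:
--         if ch in "><=*/+-":
--             run += 1
--         else:
--             total += (run + 1) // 2
--             run = 0
--     return total + (run + 1) // 2
-- ===== Notes on version B (the rewrite author's own statement) =====
-- stated objective: simpler
-- what changed: Replaces the indexed while-loop with lookahead-and-skip pairing over the sentinel-padded string by a single for-loop that accumulates the length of each maximal operator run and adds the closed form (run+1)//2 per run.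
import Mathlib
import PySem

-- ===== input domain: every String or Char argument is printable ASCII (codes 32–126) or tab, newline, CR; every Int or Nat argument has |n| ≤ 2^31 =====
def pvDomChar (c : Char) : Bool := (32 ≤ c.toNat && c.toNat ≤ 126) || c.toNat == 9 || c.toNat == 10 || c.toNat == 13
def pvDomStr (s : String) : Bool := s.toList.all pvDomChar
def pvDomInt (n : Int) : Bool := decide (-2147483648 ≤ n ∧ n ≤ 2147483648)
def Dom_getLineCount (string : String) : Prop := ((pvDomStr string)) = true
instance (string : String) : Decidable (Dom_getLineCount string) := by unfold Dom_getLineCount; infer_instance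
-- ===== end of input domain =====

-- ===== PORT A =====
-- B replaces A's pairing state machine by a run-length single pass; same values, similar cost ("simpler").
-- A-side helper: the or-chain of character comparisons, in A's order.
def isOpA (c : Char) : Bool :=
  c == '>' || c == '<' || c == '=' || c == '*' || c == '/' || c == '+' || c == '-'

-- A's while-loop over `string + " "`: reads s[i], possibly s[i+1] (then skips it), advances.
-- The `[]`-with-operator branch is unreachable on A's actual argument (it always ends in the
-- appended space, which is not an operator); in Python it would raise IndexError at s[i+1].
def loopA : List Char → Int
  | [] => 0
  | c :: rest =>
    if isOpA c then
      match rest with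
      | d :: rest' => if isOpA d then 1 + loopA rest' else 1 + loopA (d :: rest')
      | [] => 0
    else loopA rest
  termination_by l => l.length
  decreasing_by all_goals simp

def getLineCount (string : String) : Int :=
  loopA (string.toList ++ [' '])

-- ===== PORT B =====
-- B-side helper: `ch in "><=*/+-"`
def isOpB (c : Char) : Bool := "><=*/+-".toList.contains c

-- the body of B's for-loop, state = (total, run)
def stepB (st : Int × Int) (c : Char) : Int × Int :=
  if isOpB c then (st.1, st.2 + 1)
  else (st.1 + PySem.Int.floordiv (st.2 + 1) 2, 0)

def getLineCount_alt (string : String) : Int :=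
  let st := string.toList.foldl stepB (0, 0)
  st.1 + PySem.Int.floordiv (st.2 + 1) 2

-- ===== PRECONDITION & SPEC =====
def Spec_getLineCount (string : String) (out : Int) : Prop := out = getLineCount_alt string
instance (string : String) (out : Int) : Decidable (Spec_getLineCount string out) := by unfold Spec_getLineCount; infer_instance

-- ===== CLAIM (what is proved, stated in full; the proofs are below) =====
def Claim_equal_getLineCount : Prop := ∀ (string : String), Dom_getLineCount string → Spec_getLineCount string (getLineCount string)

-- ===== LEMMAS AND PROOFS =====

-- membership in "><=*/+-" is A's or-chain
theorem isOpB_eq (c : Char) : isOpB c = isOpA c := by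
  simp only [isOpB]
  rw [show "><=*/+-".toList = ['>', '<', '=', '*', '/', '+', '-'] from rfl]
  simp [isOpA, Bool.beq_eq_decide_eq, Bool.or_assoc]

-- Recursive form of B's fold: `run` carries the current operator-run length.
def bgo : List Char → Int → Int
  | [], run => PySem.Int.floordiv (run + 1) 2
  | c :: t, run =>
    if isOpA c then bgo t (run + 1)
    else PySem.Int.floordiv (run + 1) 2 + bgo t 0

theorem foldB_eq (t : List Char) (tot run : Int) :
    (t.foldl stepB (tot, run)).1 + PySem.Int.floordiv ((t.foldl stepB (tot, run)).2 + 1) 2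
      = tot + bgo t run := by
  induction t generalizing tot run with
  | nil => simp [bgo]
  | cons c t ih =>
    rw [List.foldl_cons]
    by_cases h : isOpA c = true
    · rw [show stepB (tot, run) c = (tot, run + 1) by simp [stepB, isOpB_eq, h]]
      rw [ih, bgo, if_pos h]
    · rw [show stepB (tot, run) c = (tot + PySem.Int.floordiv (run + 1) 2, 0)
          by simp [stepB, isOpB_eq, h]]
      rw [ih, bgo, if_neg h, add_assoc]

theorem floordiv_shift (run : Int) :
    PySem.Int.floordiv (run + 3) 2 = 1 + PySem.Int.floordiv (run + 1) 2 := by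
  rw [PySem.Int.floordiv_eq_ediv_of_pos (by omega), PySem.Int.floordiv_eq_ediv_of_pos (by omega)]
  omega

theorem bgo_shift (t : List Char) (run : Int) : bgo t (run + 2) = 1 + bgo t run := by
  induction t generalizing run with
  | nil =>
    simp only [bgo]
    rw [show run + 2 + 1 = run + 3 by ring]
    exact floordiv_shift run
  | cons c t ih =>
    by_cases h : isOpA c = true
    · rw [bgo, if_pos h, bgo, if_pos h,
        show run + 2 + 1 = run + 1 + 2 by ring, ih]
    · rw [bgo, if_neg h, bgo, if_neg h,
        show run + 2 + 1 = run + 3 by ring, floordiv_shift, add_assoc]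

theorem isOpA_space : isOpA ' ' = false := by decide

theorem mainA : ∀ (l : List Char), loopA (l ++ [' ']) = bgo l 0
  | [] => by simp [loopA, bgo, isOpA_space]
  | [c] => by
    by_cases h : isOpA c = true <;>
      simp only [List.cons_append, List.nil_append, loopA, bgo, h, isOpA_space,
        if_true, if_false, Bool.false_eq_true] <;> try decide
  | c :: d :: t => by
    by_cases hc : isOpA c = true
    · by_cases hd : isOpA d = true
      · simp only [List.cons_append, loopA, hc, hd, if_true]
        rw [mainA t]
        simp only [bgo, hc, hd, if_true]
        rw [show (0 : Int) + 1 + 1 = 0 + 2 by ring, bgo_shift]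
      · simp only [List.cons_append, loopA, hc, hd, if_true, if_false, Bool.false_eq_true]
        rw [← List.cons_append, mainA (d :: t)]
        simp only [bgo, hc, hd, if_true, if_false, Bool.false_eq_true]
        rw [show PySem.Int.floordiv (0 + 1) 2 = 0 by decide,
          show PySem.Int.floordiv (0 + 1 + 1) 2 = 1 by decide]
        ring
    · simp only [List.cons_append, loopA, hc, Bool.false_eq_true, if_false]
      rw [← List.cons_append, mainA (d :: t)]
      simp only [bgo, hc, Bool.false_eq_true, if_false]
      rw [show PySem.Int.floordiv (0 + 1) 2 = 0 by decide]
      exact (zero_add _).symm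

-- ===== VERDICT (by name: the statement is the Claim_ definition above) =====
theorem getLineCount_spec : Claim_equal_getLineCount := by
  intro s _
  unfold Spec_getLineCount getLineCount getLineCount_alt
  rw [mainA]
  simpa using (foldB_eq s.toList 0 0).symm
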